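-- pv_equiv track=rewrite | github.com/faith-wm/Byte-Pair-Encoding | github_class-trial.py | replace_digits_with_letters
-- ===== SOURCE A (Python) =====
-- def replace_digits_with_letters(line):
--     mapping_dict={'0':'A',
--              '1':'B',
--              '2':'C',
--              '3':'D',
--              '4':'E',
--              '5':'F',
--              '6':'G',
--              '7':'H',
--              '8':'I',
--              '9':'J'}
--     for key,value in mapping_dict.items():
--         line=line.replace(key,value)
--     return line
-- ===== SOURCE B (Python) =====
-- def replace_digits_with_letters(line):
--     mapping_dict={'0':'A',
--              '1':'B',
--              '2':'C',
--              '3':'D',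
--              '4':'E',
--              '5':'F',
--              '6':'G',
--              '7':'H',
--              '8':'I',
--              '9':'J'}
--     return ''.join(mapping_dict.get(c, c) for c in line)
-- ===== Notes on version B (the rewrite author's own statement) =====
-- stated objective: simpler
-- what changed: Replaces A's ten full-string str.replace passes (one per mapping entry) with a single left-to-right pass that translates each character once via a dict lookup and joins the results.
import Mathlib
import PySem

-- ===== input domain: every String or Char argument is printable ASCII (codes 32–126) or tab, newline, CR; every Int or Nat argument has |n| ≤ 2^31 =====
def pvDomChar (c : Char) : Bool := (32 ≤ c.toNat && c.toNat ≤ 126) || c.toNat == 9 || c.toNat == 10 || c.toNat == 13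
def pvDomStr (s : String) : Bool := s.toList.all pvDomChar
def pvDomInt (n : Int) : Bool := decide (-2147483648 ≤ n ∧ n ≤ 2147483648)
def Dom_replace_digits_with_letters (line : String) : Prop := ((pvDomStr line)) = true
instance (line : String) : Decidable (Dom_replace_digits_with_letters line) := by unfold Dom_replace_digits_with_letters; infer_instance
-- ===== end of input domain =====

-- B translates each character once in a single pass over the string (dict lookup, joined)
-- instead of A's ten full-string replace passes; objective: simpler.


-- ===== PORT A =====
-- A's mapping_dict, as the list its .items() yields (keys/values are 1-char strings)
def pvMappingItems : List (String × String) :=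
  [("0","A"),("1","B"),("2","C"),("3","D"),("4","E"),
   ("5","F"),("6","G"),("7","H"),("8","I"),("9","J")]

-- for key,value in mapping_dict.items(): line = line.replace(key, value)
def replace_digits_with_letters (line : String) : String :=
  pvMappingItems.foldl (fun l kv => PySem.Str.replace l kv.1 kv.2) line

-- ===== PORT B =====
-- B's mapping_dict, keyed by the (1-character) strings' characters
def pvMappingDict : PySem.Dict Char Char :=
  PySem.Dict.ofList
    [('0','A'),('1','B'),('2','C'),('3','D'),('4','E'),
     ('5','F'),('6','G'),('7','H'),('8','I'),('9','J')]

-- return ''.join(mapping_dict.get(c, c) for c in line)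
def replace_digits_with_letters_alt (line : String) : String :=
  String.ofList (line.toList.map (fun c => pvMappingDict.getD c c))

-- ===== PRECONDITION & SPEC =====
def Spec_replace_digits_with_letters (line : String) (out : String) : Prop := out = replace_digits_with_letters_alt line
instance (line : String) (out : String) : Decidable (Spec_replace_digits_with_letters line out) := by unfold Spec_replace_digits_with_letters; infer_instance

-- ===== CLAIM (what is proved, stated in full; the proofs are below) =====
def Claim_equal_replace_digits_with_letters : Prop := ∀ (line : String), Dom_replace_digits_with_letters line → Spec_replace_digits_with_letters line (replace_digits_with_letters line)

-- ===== LEMMAS AND PROOFS =====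

-- replacing a single-char pattern by a single-char replacement is a character map
theorem pv_go_single (c d : Char) (fuel : Nat) : ∀ (l acc : List Char), l.length ≤ fuel →
    PySem.Chars.replace.go [c] [d] fuel l acc = acc.reverse ++ l.map (fun x => if x = c then d else x) := by
  induction fuel with
  | zero => intro l acc h; simp at h; simp [h, PySem.Chars.replace.go]
  | succ n ih =>
    intro l acc h
    cases l with
    | nil => simp [PySem.Chars.replace.go]
    | cons a t =>
      simp only [PySem.Chars.replace.go, List.isPrefixOf]
      by_cases hac : a = c
      · simp [hac, ih t (d :: acc) (by simpa using h)]
      · simp [hac, Ne.symm hac, ih t (a :: acc) (by simpa using h)]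

theorem pv_replace_single (s : List Char) (c d : Char) :
    PySem.Chars.replace s [c] [d] = s.map (fun x => if x = c then d else x) := by
  simp [PySem.Chars.replace, pv_go_single c d s.length s [] le_rfl]

-- A's ten composed per-digit maps agree with B's single dict lookup, character by character
theorem pv_map_chain (l : List Char) :
    List.map
      ((fun x => if x = '9' then 'J' else x) ∘
        (fun x => if x = '8' then 'I' else x) ∘
          (fun x => if x = '7' then 'H' else x) ∘
            (fun x => if x = '6' then 'G' else x) ∘
              (fun x => if x = '5' then 'F' else x) ∘
                (fun x => if x = '4' then 'E' else x) ∘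
                  (fun x => if x = '3' then 'D' else x) ∘
                    (fun x => if x = '2' then 'C' else x) ∘
                      (fun x => if x = '1' then 'B' else x) ∘ fun x => if x = '0' then 'A' else x)
      l = List.map (fun c => pvMappingDict.getD c c) l := by
  refine List.map_congr_left fun x _ => ?_
  by_cases h0 : x = '0'
  · subst h0; decide
  by_cases h1 : x = '1'
  · subst h1; decide
  by_cases h2 : x = '2'
  · subst h2; decide
  by_cases h3 : x = '3'
  · subst h3; decide
  by_cases h4 : x = '4'
  · subst h4; decide
  by_cases h5 : x = '5'
  · subst h5; decide
  by_cases h6 : x = '6'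
  · subst h6; decide
  by_cases h7 : x = '7'
  · subst h7; decide
  by_cases h8 : x = '8'
  · subst h8; decide
  by_cases h9 : x = '9'
  · subst h9; decide
  -- x is no digit: every if is skipped on the left, the dict lookup misses on the right
  have hd : pvMappingDict = PySem.Dict.mk
    [('0','A'),('1','B'),('2','C'),('3','D'),('4','E'),
     ('5','F'),('6','G'),('7','H'),('8','I'),('9','J')] := by decide
  rw [hd]
  simp only [PySem.Dict.getD, PySem.Dict.get?_mk_cons]
  have hs : ∀ (k : Char), x ≠ k → (k == x) = false :=
    fun k h => beq_eq_false_iff_ne.mpr (Ne.symm h)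
  simp [hs _ h0, hs _ h1, hs _ h2, hs _ h3, hs _ h4, hs _ h5, hs _ h6, hs _ h7, hs _ h8, hs _ h9,
    h0, h1, h2, h3, h4, h5, h6, h7, h8, h9, PySem.Dict.get?, Function.comp]

-- ===== VERDICT (by name: the statement is the Claim_ definition above) =====
theorem replace_digits_with_letters_spec : Claim_equal_replace_digits_with_letters := by
  intro line _
  show replace_digits_with_letters line = replace_digits_with_letters_alt line
  unfold replace_digits_with_letters replace_digits_with_letters_alt pvMappingItems
  refine Eq.trans String.ofList_toList.symm (congrArg String.ofList ?_)
  simp only [List.foldl, PySem.Str.toList_replace]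
  have h0 : ("0":String).toList = ['0'] := rfl
  have h1 : ("1":String).toList = ['1'] := rfl
  have h2 : ("2":String).toList = ['2'] := rfl
  have h3 : ("3":String).toList = ['3'] := rfl
  have h4 : ("4":String).toList = ['4'] := rfl
  have h5 : ("5":String).toList = ['5'] := rfl
  have h6 : ("6":String).toList = ['6'] := rfl
  have h7 : ("7":String).toList = ['7'] := rfl
  have h8 : ("8":String).toList = ['8'] := rfl
  have h9 : ("9":String).toList = ['9'] := rfl
  have hA : ("A":String).toList = ['A'] := rfl
  have hB : ("B":String).toList = ['B'] := rfl
  have hC : ("C":String).toList = ['C'] := rfl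
  have hD : ("D":String).toList = ['D'] := rfl
  have hE : ("E":String).toList = ['E'] := rfl
  have hF : ("F":String).toList = ['F'] := rfl
  have hG : ("G":String).toList = ['G'] := rfl
  have hH : ("H":String).toList = ['H'] := rfl
  have hI : ("I":String).toList = ['I'] := rfl
  have hJ : ("J":String).toList = ['J'] := rfl
  simp only [h0,h1,h2,h3,h4,h5,h6,h7,h8,h9,hA,hB,hC,hD,hE,hF,hG,hH,hI,hJ,
    pv_replace_single, List.map_map]
  exact pv_map_chain line.toList
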